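-- pv_equiv track=rewrite | github.com/MuhammadAdil006/CompetitiveProgramming | simple/1703B_icpcBallons.py | solve
-- ===== SOURCE A (Python) =====
-- def solve(a):
--     dic = {}
--     count = 0
--     for i in a:
--         if i not in dic.keys():
--             dic[i] = 1
--             count += 2
--         else:
--             count += 1
--     return count
-- ===== SOURCE B (Python) =====
-- def solve(a):
--     return len(a) + len(set(a))
-- ===== Notes on version B (the rewrite author's own statement) =====
-- stated objective: simpler
-- what changed: Replaces the per-element dict-membership loop with the closed form len(a) + len(set(a)) (one C-level set construction), since each element contributes 1 plus an extra 1 per distinct value.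
import Mathlib
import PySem

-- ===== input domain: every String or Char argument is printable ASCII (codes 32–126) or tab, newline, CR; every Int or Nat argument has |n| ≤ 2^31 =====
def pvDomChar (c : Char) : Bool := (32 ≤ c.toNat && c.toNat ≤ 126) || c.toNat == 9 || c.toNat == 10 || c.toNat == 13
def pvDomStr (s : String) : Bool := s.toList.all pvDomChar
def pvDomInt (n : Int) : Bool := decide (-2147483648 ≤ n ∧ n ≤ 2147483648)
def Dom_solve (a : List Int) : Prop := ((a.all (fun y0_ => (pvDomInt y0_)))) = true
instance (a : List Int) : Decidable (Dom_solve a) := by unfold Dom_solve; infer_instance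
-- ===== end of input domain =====

-- B computes len(a) + len(set(a)) directly instead of A's dict-membership counting loop (objective: simpler).
-- ===== PORT A =====
def solve (a : List Int) : Int :=
  (a.foldl (fun (st : PySem.Dict Int Int × Int) i =>
      if ¬ (i ∈ st.1.keys) then (st.1.insert i 1, st.2 + 2)
      else (st.1, st.2 + 1))
    (PySem.Dict.empty, 0)).2

-- ===== PORT B =====
def solve_alt (a : List Int) : Int :=
  (a.length : Int) + ((PySem.Set.ofList a).length : Int)

-- ===== PRECONDITION & SPEC =====
def Spec_solve (a : List Int) (out : Int) : Prop := out = solve_alt a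
instance (a : List Int) (out : Int) : Decidable (Spec_solve a out) := by unfold Spec_solve; infer_instance

-- ===== CLAIM (what is proved, stated in full; the proofs are below) =====
def Claim_equal_solve : Prop := ∀ (a : List Int), Dom_solve a → Spec_solve a (solve a)

-- ===== LEMMAS AND PROOFS =====

-- Loop invariant: from any dict d with count c, the loop's final count is
-- c + (length of the rest) + (number of fresh distinct keys the rest contributes).
theorem solve_loop_inv (xs : List Int) (d : PySem.Dict Int Int) (c : Int) :
    (xs.foldl (fun (st : PySem.Dict Int Int × Int) i =>
        if ¬ (i ∈ st.1.keys) then (st.1.insert i 1, st.2 + 2)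
        else (st.1, st.2 + 1)) (d, c)).2
      = c + (xs.length : Int) + ((PySem.Set.update d.keys xs).length : Int) - (d.keys.length : Int) := by
  induction xs generalizing d c with
  | nil => simp [PySem.Set.update]
  | cons x xs ih =>
    simp only [List.foldl_cons]
    by_cases hx : x ∈ d.keys
    · have hc : d.contains x = true := (PySem.Dict.contains_iff_mem_keys _ _).mpr hx
      have hadd : PySem.Set.add d.keys x = d.keys := by
        simp [PySem.Set.add, hx]
      rw [if_neg (by simp [hx]), ih,
        show PySem.Set.update d.keys xs = PySem.Set.update d.keys (x :: xs) from by
          simp [PySem.Set.update, hadd]]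
      simp [List.length_cons]
      ring
    · have hc : d.contains x = false := by
        by_contra h
        exact hx ((PySem.Dict.contains_iff_mem_keys _ _).mp (by simpa using h))
      have hadd : PySem.Set.add d.keys x = d.keys ++ [x] := by
        simp [PySem.Set.add, hx]
      rw [if_pos (by simp [hx]), ih, PySem.Dict.keys_insert_of_not_contains d 1 hc,
        show PySem.Set.update (d.keys ++ [x]) xs = PySem.Set.update d.keys (x :: xs) from by
          simp [PySem.Set.update, hadd]]
      simp [List.length_cons, List.length_append]
      ring

-- ===== VERDICT (by name: the statement is the Claim_ definition above) =====
theorem solve_spec : Claim_equal_solve := by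
  intro a _
  unfold Spec_solve solve solve_alt
  rw [solve_loop_inv]
  have : PySem.Set.update (PySem.Dict.empty (κ := Int) (ν := Int)).keys a = PySem.Set.ofList a := by
    simp [PySem.Set.update, PySem.Set.ofList_eq_foldl, PySem.Dict.keys_empty]
  rw [this]
  simp [PySem.Dict.keys_empty]
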